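-- pv_equiv track=rewrite | github.com/prakHr/CompetitiveCoding | Hackerrank2.py | ThreelargestInO_n_time
-- ===== SOURCE A (Python) =====
-- def ThreelargestInO_n_time(arr,INT_MIN):
--     if len(arr)<3:
--         return -1
--     first=second=third=INT_MIN
--     for i in range(len(arr)):
--         if first<arr[i]:
--             third=second
--             second=first
--             first=arr[i]
--         elif second<arr[i]<first:
--             third=second
--             second=arr[i]
--         elif third<arr[i]<second:#if this is case then we dont need to set the first and second value only third largest no is going to be arr[i]
--             third=arr[i]
--     return first,second,third
-- ===== SOURCE B (Python) =====
-- def ThreelargestInO_n_time(arr, INT_MIN):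
--     if len(arr) < 3:
--         return -1
--     cand = sorted({x for x in arr if x > INT_MIN}, reverse=True)
--     vals = (cand + [INT_MIN, INT_MIN, INT_MIN])[:3]
--     return tuple(vals)
-- ===== Notes on version B (the rewrite author's own statement) =====
-- stated objective: simpler
-- what changed: A's single-pass first/second/third branch tracking is replaced by building the set of distinct values above INT_MIN, sorting it descending and taking the first three padded with INT_MIN.
-- outside the precondition, e.g. on ThreelargestInO_n_time([1, 2], 0): A returns -1, B returns -1
import Mathlib
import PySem

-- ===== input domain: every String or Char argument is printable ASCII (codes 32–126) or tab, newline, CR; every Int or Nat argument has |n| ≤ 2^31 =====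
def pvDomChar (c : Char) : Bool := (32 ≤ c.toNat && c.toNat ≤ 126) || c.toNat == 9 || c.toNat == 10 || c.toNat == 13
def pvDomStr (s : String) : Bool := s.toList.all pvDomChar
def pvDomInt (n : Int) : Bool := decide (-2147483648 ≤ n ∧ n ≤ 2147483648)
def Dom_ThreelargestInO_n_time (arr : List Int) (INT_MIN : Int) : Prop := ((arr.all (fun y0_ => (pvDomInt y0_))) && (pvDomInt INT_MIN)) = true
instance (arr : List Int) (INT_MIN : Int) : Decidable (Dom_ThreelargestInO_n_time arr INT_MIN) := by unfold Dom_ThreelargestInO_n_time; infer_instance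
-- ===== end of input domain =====

-- B replaces A's single-pass first/second/third branch tracking by sorting the set of
-- distinct values above INT_MIN descending and taking the first three padded with INT_MIN (objective: simpler).

-- ===== PORT A =====
-- A-side helper: the body of A's for-loop (first/second/third update), one step
def pvStep (st : Int × Int × Int) (x : Int) : Int × Int × Int :=
  if st.1 < x then (x, st.1, st.2.1)
  else if st.2.1 < x ∧ x < st.1 then (st.1, x, st.2.1)
  else if st.2.2 < x ∧ x < st.2.1 then (st.1, st.2.1, x)
  else st

def ThreelargestInO_n_time (arr : List Int) (INT_MIN : Int) : Int × Int × Int :=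
  -- Python returns the scalar -1 when len(arr)<3 (not a triple); that case is excluded by Pre_
  if PySem.List.len arr < 3 then (-1, -1, -1)
  else (PySem.List.pyRange 0 (PySem.List.len arr) 1).foldl
        (fun st i => pvStep st (PySem.List.pyGetD arr i 0)) (INT_MIN, INT_MIN, INT_MIN)

-- ===== PORT B =====
-- B-side helper: (cand + [m, m, m])[:3] as a tuple
def pvPad3 (c : List Int) (m : Int) : Int × Int × Int :=
  match c with
  | [] => (m, m, m)
  | [a] => (a, m, m)
  | [a, b] => (a, b, m)
  | a :: b :: c3 :: _ => (a, b, c3)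

def ThreelargestInO_n_time_alt (arr : List Int) (INT_MIN : Int) : Int × Int × Int :=
  if PySem.List.len arr < 3 then (-1, -1, -1)
  else pvPad3
        (PySem.List.sorted (PySem.Set.ofList (arr.filter (fun x => INT_MIN < x))) (fun x => x) true)
        INT_MIN

-- ===== PRECONDITION & SPEC =====
-- Pre_ excludes arrays with fewer than 3 elements, where Python A returns the scalar -1 instead of a triple of ints.
def Pre_ThreelargestInO_n_time (arr : List Int) (INT_MIN : Int) : Prop := 3 ≤ arr.length
instance (arr : List Int) (INT_MIN : Int) : Decidable (Pre_ThreelargestInO_n_time arr INT_MIN) := by unfold Pre_ThreelargestInO_n_time; infer_instance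
def pvWitness_ThreelargestInO_n_time : List Int × Int := ([3, 1, 2], 0)

def Spec_ThreelargestInO_n_time (arr : List Int) (INT_MIN : Int) (out : Int × Int × Int) : Prop := out = ThreelargestInO_n_time_alt arr INT_MIN
instance (arr : List Int) (INT_MIN : Int) (out : Int × Int × Int) : Decidable (Spec_ThreelargestInO_n_time arr INT_MIN out) := by unfold Spec_ThreelargestInO_n_time; infer_instance

-- ===== CLAIM (what is proved, stated in full; the proofs are below) =====
def Claim_equal_ThreelargestInO_n_time : Prop := ∀ (arr : List Int) (INT_MIN : Int), Dom_ThreelargestInO_n_time arr INT_MIN → Pre_ThreelargestInO_n_time arr INT_MIN → Spec_ThreelargestInO_n_time arr INT_MIN (ThreelargestInO_n_time arr INT_MIN)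

-- ===== LEMMAS AND PROOFS =====

def pvIns (x : Int) : List Int → List Int
  | [] => [x]
  | a :: t => if a < x then x :: a :: t else if x = a then a :: t else a :: pvIns x t

lemma pvIns_mem (x y : Int) (c : List Int) : y ∈ pvIns x c ↔ y = x ∨ y ∈ c := by
  induction c with
  | nil => simp [pvIns]
  | cons a t ih =>
    simp only [pvIns]
    split_ifs with h1 h2
    · simp [List.mem_cons]
    · subst h2; simp only [List.mem_cons]; tauto
    · simp only [List.mem_cons, ih]; tauto

lemma pvIns_of_mem (x : Int) (c : List Int) (hc : c.Pairwise (· > ·)) (hx : x ∈ c) :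
    pvIns x c = c := by
  induction c with
  | nil => simp at hx
  | cons a t ih =>
    simp only [pvIns]
    rcases List.mem_cons.mp hx with h | h
    · simp [h]
    · have ha : a > x := (List.pairwise_cons.mp hc).1 x h
      rw [if_neg (by omega), if_neg (by omega), ih (List.pairwise_cons.mp hc).2 h]

lemma pvIns_perm (x : Int) (c : List Int) (hx : x ∉ c) : (pvIns x c).Perm (c ++ [x]) := by
  induction c with
  | nil => simp [pvIns]
  | cons a t ih =>
    have hxa : x ≠ a := fun h => hx (h ▸ List.mem_cons_self)
    have hxt : x ∉ t := fun h => hx (List.mem_cons_of_mem _ h)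
    simp only [pvIns, if_neg hxa]
    split_ifs with h1
    · simpa using (List.perm_middle (l₁ := a :: t) (l₂ := [])).symm
    · exact (List.Perm.cons a (ih hxt)).trans (by simp)

lemma pvIns_pairwise (x : Int) (c : List Int) (hc : c.Pairwise (· > ·)) :
    (pvIns x c).Pairwise (· > ·) := by
  induction c with
  | nil => simp [pvIns]
  | cons a t ih =>
    obtain ⟨hat, ht⟩ := List.pairwise_cons.mp hc
    simp only [pvIns]
    split_ifs with h1 h2
    · refine List.pairwise_cons.mpr ⟨?_, hc⟩
      intro y hy
      rcases List.mem_cons.mp hy with h|h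
      · omega
      · have := hat y h; omega
    · exact hc
    · refine List.pairwise_cons.mpr ⟨?_, ih ht⟩
      intro y hy
      rcases (pvIns_mem x y t).mp hy with h|h
      · omega
      · exact hat y h
def pvCand (l : List Int) (m : Int) : List Int :=
  PySem.List.sorted (PySem.Set.ofList (l.filter (fun x => m < x))) (fun x => x) true

lemma pvCand_pairwise (l : List Int) (m : Int) : (pvCand l m).Pairwise (· > ·) := by
  have hle := PySem.List.sorted_pairwise_rev (PySem.Set.ofList (l.filter (fun x => m < x))) (fun x => x)
  have hnd : (pvCand l m).Nodup :=
    ((PySem.List.sorted_perm _ _ _).nodup_iff).mpr (PySem.Set.nodup_ofList _)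
  have := List.Pairwise.and hle (List.Nodup.pairwise_of_forall_ne hnd (fun a _ b _ h => h))
  exact this.imp (fun h => lt_of_le_of_ne h.1 (fun e => h.2 e.symm))

lemma pvCand_mem (l : List Int) (m : Int) (y : Int) : y ∈ pvCand l m ↔ (y ∈ l ∧ m < y) := by
  simp [pvCand, PySem.List.mem_sorted, PySem.Set.mem_ofList, List.mem_filter]

lemma pvCand_snoc_le (l : List Int) (m x : Int) (hx : x ≤ m) :
    pvCand (l ++ [x]) m = pvCand l m := by
  have hnot : ¬ m < x := by omega
  unfold pvCand
  rw [List.filter_append]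
  simp [hnot]

lemma set_ofList_snoc (ys : List Int) (x : Int) :
    PySem.Set.ofList (ys ++ [x]) = PySem.Set.add (PySem.Set.ofList ys) x := by
  simp [PySem.Set.ofList_eq_foldl, List.foldl_append]

lemma pvCand_snoc_gt (l : List Int) (m x : Int) (hx : m < x) :
    pvCand (l ++ [x]) m = pvIns x (pvCand l m) := by
  have hfilter : (l ++ [x]).filter (fun y => decide (m < y)) = l.filter (fun y => decide (m < y)) ++ [x] := by
    rw [List.filter_append]; simp [hx]
  rw [pvCand, hfilter, set_ofList_snoc]
  apply PySem.List.sorted_rev_eq_of_perm_of_pairwise_gt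
  · by_cases hmem : x ∈ PySem.Set.ofList (List.filter (fun y => decide (m < y)) l)
    · rw [pvIns_of_mem x _ (pvCand_pairwise l m) (by rw [pvCand, PySem.List.mem_sorted]; exact hmem)]
      rw [show (PySem.Set.ofList (List.filter (fun y => decide (m < y)) l)).add x
            = PySem.Set.ofList (List.filter (fun y => decide (m < y)) l) by
        simp [PySem.Set.add, hmem]]
      exact PySem.List.sorted_perm _ _ _
    · have h1 : x ∉ pvCand l m := by rwa [pvCand, PySem.List.mem_sorted]
      refine (pvIns_perm x _ h1).trans ?_
      rw [show (PySem.Set.ofList (List.filter (fun y => decide (m < y)) l)).add x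
            = PySem.Set.ofList (List.filter (fun y => decide (m < y)) l) ++ [x] by
        simp [PySem.Set.add, hmem]]
      exact (PySem.List.sorted_perm _ _ _).append_right [x]
  · exact (pvIns_pairwise x _ (pvCand_pairwise l m)).imp (fun h => by simpa using h)

lemma pvStep_pad_le (c : List Int) (m x : Int) (hm : ∀ y ∈ c, m < y) (hx : x ≤ m) :
    pvStep (pvPad3 c m) x = pvPad3 c m := by
  rcases c with _ | ⟨a, _ | ⟨b, _ | ⟨c3, rest⟩⟩⟩
  · (simp [pvStep, pvPad3, pvIns, show ¬ m < x by omega]) <;> omega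
  · have := hm a (by simp)
    (simp [pvStep, pvPad3, pvIns, show ¬ a < x by omega, show ¬ m < x by omega]) <;> omega
  · have := hm a (by simp); have := hm b (by simp)
    (simp [pvStep, pvPad3, pvIns, show ¬ a < x by omega, show ¬ b < x by omega, show ¬ m < x by omega]) <;> omega
  · have := hm a (by simp); have := hm b (by simp); have := hm c3 (by simp)
    (simp [pvStep, pvPad3, pvIns, show ¬ a < x by omega, show ¬ b < x by omega, show ¬ c3 < x by omega]) <;> omega

lemma pvStep_pad_gt (c : List Int) (m x : Int) (hc : c.Pairwise (· > ·))
    (hm : ∀ y ∈ c, m < y) (hx : m < x) :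
    pvStep (pvPad3 c m) x = pvPad3 (pvIns x c) m := by
  rcases c with _ | ⟨a, _ | ⟨b, _ | ⟨c3, rest⟩⟩⟩
  · (simp [pvStep, pvPad3, pvIns, show m < x by omega]) <;> omega
  · have ham := hm a (by simp)
    rcases lt_trichotomy a x with h|h|h
    · (simp [pvStep, pvPad3, pvIns, show a < x by omega, show m < x by omega, show x ≠ a by omega]) <;> omega
    · subst h; (simp [pvStep, pvPad3, pvIns, show ¬ a < m by omega]) <;> omega
    · (simp [pvStep, pvPad3, pvIns, show ¬ a < x by omega, show x ≠ a by omega, show x < a by omega, show m < x by omega]) <;> omega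
  · have ham := hm a (by simp); have hbm := hm b (by simp)
    have hab : b < a := by have := (List.pairwise_cons.mp hc).1 b (by simp); omega
    rcases lt_trichotomy a x with h|h|h
    · (simp [pvStep, pvPad3, pvIns, show a < x by omega, show b < x by omega, show m < x by omega, show x ≠ a by omega]) <;> omega
    · subst h; (simp [pvStep, pvPad3, pvIns, show b < a by omega, show ¬ a < b by omega]) <;> omega
    · rcases lt_trichotomy b x with h2|h2|h2
      · (simp [pvStep, pvPad3, pvIns, show ¬ a < x by omega, show x ≠ a by omega, show x < a by omega, show b < x by omega, show m < x by omega]) <;> omega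
      · subst h2; (simp [pvStep, pvPad3, pvIns, show ¬ a < b by omega, show b ≠ a by omega]) <;> omega
      · (simp [pvStep, pvPad3, pvIns, show ¬ a < x by omega, show x ≠ a by omega, show x < a by omega, show ¬ b < x by omega, show x ≠ b by omega, show x < b by omega, show m < x by omega]) <;> omega
  · have ham := hm a (by simp); have hbm := hm b (by simp); have hcm := hm c3 (by simp)
    have hab : b < a := by have := (List.pairwise_cons.mp hc).1 b (by simp); omega
    have hbc : c3 < b := by
      have := (List.pairwise_cons.mp (List.pairwise_cons.mp hc).2).1 c3 (by simp); omega
    rcases lt_trichotomy a x with h|h|h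
    · (simp [pvStep, pvPad3, pvIns, show a < x by omega, show b < x by omega, show c3 < x by omega, show x ≠ a by omega]) <;> omega
    · subst h; (simp [pvStep, pvPad3, pvIns, show b < a by omega, show ¬ a < b by omega, show c3 < a by omega]) <;> omega
    · rcases lt_trichotomy b x with h2|h2|h2
      · (simp [pvStep, pvPad3, pvIns, show ¬ a < x by omega, show x ≠ a by omega, show x < a by omega, show b < x by omega, show c3 < x by omega]) <;> omega
      · subst h2; (simp [pvStep, pvPad3, pvIns, show ¬ a < b by omega, show b ≠ a by omega, show c3 < b by omega, show ¬ b < c3 by omega]) <;> omega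
      · rcases lt_trichotomy c3 x with h3|h3|h3
        · (simp [pvStep, pvPad3, pvIns, show ¬ a < x by omega, show x ≠ a by omega, show x < a by omega, show ¬ b < x by omega, show x ≠ b by omega, show x < b by omega, show c3 < x by omega, show m < x by omega]) <;> omega
        · subst h3; (simp [pvStep, pvPad3, pvIns, show ¬ a < c3 by omega, show c3 ≠ a by omega, show ¬ b < c3 by omega, show c3 ≠ b by omega]) <;> omega
        · (simp [pvStep, pvPad3, pvIns, show ¬ a < x by omega, show x ≠ a by omega, show x < a by omega, show ¬ b < x by omega, show x ≠ b by omega, show x < b by omega, show ¬ c3 < x by omega, show x ≠ c3 by omega, show x < c3 by omega]) <;> omega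

lemma pv_main (l : List Int) (m : Int) :
    l.foldl pvStep (m, m, m) = pvPad3 (pvCand l m) m := by
  induction l using List.reverseRecOn with
  | nil => simp [pvCand, pvPad3, PySem.List.sorted, PySem.Set.ofList]
  | append_singleton l x ih =>
    rw [List.foldl_append, List.foldl_cons, List.foldl_nil, ih]
    by_cases hx : m < x
    · rw [pvCand_snoc_gt l m x hx,
          pvStep_pad_gt (pvCand l m) m x (pvCand_pairwise l m)
            (fun y hy => ((pvCand_mem l m y).mp hy).2) hx]
    · rw [pvCand_snoc_le l m x (by omega),
          pvStep_pad_le (pvCand l m) m x (fun y hy => ((pvCand_mem l m y).mp hy).2) (by omega)]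

-- ===== VERDICT (by name: the statement is the Claim_ definition above) =====
theorem ThreelargestInO_n_time_spec : Claim_equal_ThreelargestInO_n_time := by
  intro arr m _ hpre
  unfold Spec_ThreelargestInO_n_time ThreelargestInO_n_time ThreelargestInO_n_time_alt
  have hlen : ¬ (PySem.List.len arr < 3) := by
    simp [PySem.List.len_eq]; exact_mod_cast hpre
  rw [if_neg hlen, if_neg hlen]
  have h := PySem.List.foldl_pyRange_pyGetD (xs := arr) (a := 0) (f := pvStep)
      (d := 0) (init := (m, m, m)) (by norm_num)
  simpa using h.trans (pv_main arr m)
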